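-- pv_equiv track=rewrite | github.com/Hannah-Abi/python-pro-21 | intro/part04-11_first_second_last/src/first_second_last.py | second_word
-- ===== SOURCE A (Python) =====
-- def second_word(word):
--     i = 0
--     while True:
--         sp = word.find(" ")
--         if (i == 1):
--             if (sp == -1):
--                 return word
--             else:
--                 return word[:sp]
--             break
--         word = word[sp+1:]
--         i += 1
-- ===== SOURCE B (Python) =====
-- def second_word(word):
--     if " " in word:
--         return word.split(" ")[1]
--     return word
-- ===== Notes on version B (the rewrite author's own statement) =====
-- stated objective: simpler
-- what changed: Replaces A's counter-driven while-True loop of repeated find/reslice passes by a single membership guard plus str.split on the single-space separator and indexing element 1 of the token list.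
import Mathlib
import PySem

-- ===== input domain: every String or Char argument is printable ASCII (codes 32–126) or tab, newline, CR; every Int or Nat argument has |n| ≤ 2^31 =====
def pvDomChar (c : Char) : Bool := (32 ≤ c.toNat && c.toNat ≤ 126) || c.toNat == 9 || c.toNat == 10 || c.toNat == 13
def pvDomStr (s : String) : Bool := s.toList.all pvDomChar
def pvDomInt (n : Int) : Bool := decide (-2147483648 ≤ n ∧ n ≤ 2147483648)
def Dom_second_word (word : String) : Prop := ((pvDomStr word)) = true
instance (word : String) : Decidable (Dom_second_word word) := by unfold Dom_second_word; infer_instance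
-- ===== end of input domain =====

-- B replaces A's counter-driven find/reslice loop by a guard plus split(" ")[1]; objective: simpler.

-- ===== PORT A =====
-- A's 'while True' loop with counter i; it always returns at i == 1, so fuel 2 suffices
-- (the fuel-0 branch is unreachable and only makes the recursion total).
def secondWordLoopA (fuel : Nat) (i : Int) (word : String) : String :=
  match fuel with
  | 0 => word
  | f + 1 =>
    let sp := PySem.Str.find word " "
    if i == 1 then
      (if sp == -1 then word else PySem.Str.slice word none (some sp))
    else
      secondWordLoopA f (i + 1) (PySem.Str.slice word (some (sp + 1)) none)

def second_word (word : String) : String := secondWordLoopA 2 0 word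

-- ===== PORT B =====
def second_word_alt (word : String) : String :=
  if PySem.Str.isIn " " word then
    match PySem.Str.split? word " " with
    | some parts => (PySem.List.pyGet? parts 1).getD ""
        -- 'none'/'getD' fallbacks are unreachable: the separator " " is nonempty and the
        -- guard guarantees at least two parts, so the Python [1] indexing never raises.
    | none => ""
  else word

-- ===== PRECONDITION & SPEC =====
def Spec_second_word (word : String) (out : String) : Prop := out = second_word_alt word
instance (word : String) (out : String) : Decidable (Spec_second_word word out) := by unfold Spec_second_word; infer_instance

-- ===== CLAIM (what is proved, stated in full; the proofs are below) =====
def Claim_equal_second_word : Prop := ∀ (word : String), Dom_second_word word → Spec_second_word word (second_word word)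

-- ===== LEMMAS AND PROOFS =====

-- structural spec of splitting on a single space: the list of segments
def pvSegs : List Char → List (List Char)
  | [] => [[]]
  | c :: t => if c = ' ' then [] :: pvSegs t else (c :: (pvSegs t).headI) :: (pvSegs t).tail

lemma pvSegs_ne_nil (l : List Char) : pvSegs l ≠ [] := by
  cases l with
  | nil => simp [pvSegs]
  | cons c t => by_cases h : c = ' ' <;> simp [pvSegs, h]

lemma splitOnGo_eq_segs (l : List Char) : ∀ (fuel : Nat) (cur : List Char)
    (acc : List (List Char)), l.length ≤ fuel →
    PySem.Chars.splitOn.go [' '] fuel l cur acc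
      = acc.reverse ++ List.modifyHead (cur.reverse ++ ·) (pvSegs l) := by
  induction l with
  | nil =>
    intro fuel cur acc _
    cases fuel <;> simp [PySem.Chars.splitOn.go, pvSegs]
  | cons c t ih =>
    intro fuel cur acc hf
    cases fuel with
    | zero => simp at hf
    | succ f =>
      have hft : t.length ≤ f := by simpa using Nat.lt_succ_iff.mp (by simpa using hf)
      by_cases hc : c = ' '
      · subst hc
        have hp : ([' '].isPrefixOf (' ' :: t)) = true := by simp [List.isPrefixOf]
        simp only [PySem.Chars.splitOn.go, hp, if_pos]
        rw [show List.drop [' '].length (' ' :: t) = t from rfl]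
        rw [ih f [] (cur.reverse :: acc) hft]
        cases h : pvSegs t with
        | nil => exact absurd h (pvSegs_ne_nil t)
        | cons a r => simp [pvSegs, h, List.modifyHead]
      · have hp : ([' '].isPrefixOf (c :: t)) = false := by
          simp [List.isPrefixOf]; exact fun h => hc h.symm
        simp only [PySem.Chars.splitOn.go, hp, Bool.false_eq_true, if_false]
        rw [ih f (c :: cur) acc hft]
        cases h : pvSegs t with
        | nil => exact absurd h (pvSegs_ne_nil t)
        | cons a r => simp [pvSegs, hc, h, List.modifyHead]

lemma splitOn_eq_segs (l : List Char) : PySem.Chars.splitOn l [' '] = pvSegs l := by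
  unfold PySem.Chars.splitOn
  rw [splitOnGo_eq_segs l (l.length + 1) [] [] (Nat.le_succ _)]
  cases h : pvSegs l with
  | nil => exact absurd h (pvSegs_ne_nil l)
  | cons a r => simp [List.modifyHead]

lemma findGo_shift (t : List Char) : ∀ (k : Nat),
    PySem.Chars.find.go [' '] t k
      = if PySem.Chars.find t [' '] = -1 then -1 else PySem.Chars.find t [' '] + k := by
  induction t with
  | nil => intro k; simp [PySem.Chars.find, PySem.Chars.find.go, List.isEmpty]
  | cons c r ih =>
    intro k
    by_cases hc : c = ' '
    · subst hc
      have hp : ([' '].isPrefixOf (' ' :: r)) = true := by simp [List.isPrefixOf]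
      simp [PySem.Chars.find, PySem.Chars.find.go, hp]
    · have hp : ([' '].isPrefixOf (c :: r)) = false := by
        simp [List.isPrefixOf]; exact fun h => hc h.symm
      have e : PySem.Chars.find (c :: r) [' '] = PySem.Chars.find.go [' '] r 1 := by
        simp [PySem.Chars.find, PySem.Chars.find.go, hp]
      have l1 : PySem.Chars.find.go [' '] (c :: r) k = PySem.Chars.find.go [' '] r (k + 1) := by
        simp [PySem.Chars.find.go, hp]
      have hb := PySem.Chars.neg_one_le_find r [' ']
      rw [l1, ih (k + 1), e, ih 1]
      by_cases h : PySem.Chars.find r [' '] = -1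
      · simp [h]
      · simp only [h, if_false]
        split <;> push_cast <;> omega

lemma find_space (l : List Char) :
    PySem.Chars.find l [' ']
      = if ' ' ∈ l then ((l.takeWhile (fun c => c != ' ')).length : Int) else -1 := by
  induction l with
  | nil => simp [PySem.Chars.find, PySem.Chars.find.go, List.isEmpty]
  | cons c t ih =>
    by_cases hc : c = ' '
    · subst hc
      have hp : ([' '].isPrefixOf (' ' :: t)) = true := by simp [List.isPrefixOf]
      simp [PySem.Chars.find, PySem.Chars.find.go, hp, List.takeWhile]
    · have hp : ([' '].isPrefixOf (c :: t)) = false := by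
        simp [List.isPrefixOf]; exact fun h => hc h.symm
      have h1 : PySem.Chars.find (c :: t) [' ']
          = if PySem.Chars.find t [' '] = -1 then -1 else PySem.Chars.find t [' '] + 1 := by
        have e : PySem.Chars.find (c :: t) [' '] = PySem.Chars.find.go [' '] t 1 := by
          simp [PySem.Chars.find, PySem.Chars.find.go, hp]
        rw [e, findGo_shift t 1]; norm_num
      have hA : List.takeWhile (fun c => c != ' ') (c :: t)
          = c :: List.takeWhile (fun c => c != ' ') t :=
        List.takeWhile_cons_of_pos (by simp [hc])
      rw [h1, ih]
      by_cases hm : ' ' ∈ t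
      · rw [if_pos hm,
          if_neg (by omega : ¬(((t.takeWhile (fun c => c != ' ')).length : Int) = -1)),
          if_pos (List.mem_cons_of_mem _ hm), hA]
        push_cast [List.length_cons]; ring
      · have hnm : ' ' ∉ c :: t := by
          simp only [List.mem_cons, not_or, hm, not_false_iff, and_true]
          exact fun h => hc h.symm
        rw [if_neg hm, if_pos rfl, if_neg hnm]

lemma segs_struct (l : List Char) :
    pvSegs l = l.takeWhile (fun c => c != ' ')
      :: (if ' ' ∈ l then pvSegs ((l.dropWhile (fun c => c != ' ')).tail) else []) := by
  induction l with
  | nil => simp [pvSegs]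
  | cons c t ih =>
    by_cases hc : c = ' '
    · subst hc; simp [pvSegs, List.takeWhile, List.dropWhile]
    · have hA : List.takeWhile (fun c => c != ' ') (c :: t)
          = c :: List.takeWhile (fun c => c != ' ') t :=
        List.takeWhile_cons_of_pos (by simp [hc])
      have hD : List.dropWhile (fun c => c != ' ') (c :: t)
          = List.dropWhile (fun c => c != ' ') t :=
        List.dropWhile_cons_of_pos (by simp [hc])
      rw [pvSegs, if_neg hc, ih, hA, hD]
      by_cases hm : ' ' ∈ t
      · simp [hm, List.mem_cons_of_mem _ hm]
      · have hnm : ' ' ∉ c :: t := by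
          simp only [List.mem_cons, not_or, hm, not_false_iff, and_true]
          exact fun h => hc h.symm
        simp [hm, hnm]

lemma drop_after_first_space (l : List Char) :
    l.drop ((l.takeWhile (fun c => c != ' ')).length + 1)
      = (l.dropWhile (fun c => c != ' ')).tail := by
  set n := (l.takeWhile (fun c => c != ' ')).length with hn
  have key : l = l.takeWhile (fun c => c != ' ') ++ l.dropWhile (fun c => c != ' ') :=
    (List.takeWhile_append_dropWhile).symm
  conv_lhs => rw [key]
  rw [← List.drop_drop, hn, List.drop_left, List.drop_one]

lemma takeWhile_of_not_mem (t : List Char) (h : ' ' ∉ t) :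
    t.takeWhile (fun c => c != ' ') = t := by
  apply List.takeWhile_eq_self_iff.mpr
  intro c hc
  simp [bne]
  exact fun he => h (he ▸ hc)

-- ===== VERDICT (by name: the statement is the Claim_ definition above) =====
theorem second_word_spec : Claim_equal_second_word := by
  intro word _
  unfold Spec_second_word second_word second_word_alt secondWordLoopA
  simp only [secondWordLoopA]
  norm_num
  simp only [show (" " : String).toList = [' '] from rfl]
  by_cases hm : ' ' ∈ word.toList
  · set l := word.toList with hl
    set n := (l.takeWhile (fun c => c != ' ')).length with hn
    have hf : PySem.Chars.find l [' '] = (n : Int) := by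
      rw [find_space]; simp [hm]; exact hn.symm
    have hIs : PySem.Chars.isIn [' '] l = true := by
      simp [PySem.Chars.isIn, hf]
    have hsl : PySem.List.slice l (some ((n : Int) + 1)) = (l.dropWhile (fun c => c != ' ')).tail := by
      rw [PySem.List.slice_from l (by omega : (0 : Int) ≤ (n : Int) + 1)]
      rw [show ((n : Int) + 1).toNat = n + 1 from by omega]
      exact drop_after_first_space l
    set t' := (l.dropWhile (fun c => c != ' ')).tail with ht'
    rw [hf, hsl, hIs]
    have hsplit : PySem.Str.split? word " "
        = some (String.ofList (l.takeWhile (fun c => c != ' '))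
            :: String.ofList (t'.takeWhile (fun c => c != ' '))
            :: ((if ' ' ∈ t' then pvSegs ((t'.dropWhile (fun c => c != ' ')).tail) else []).map String.ofList)) := by
      show Option.map (fun x => List.map String.ofList x) (PySem.Chars.split? word.toList " ".toList) = _
      simp only [show (" " : String).toList = [' '] from rfl, PySem.Chars.split?]
      rw [if_neg (by simp), splitOn_eq_segs]
      rw [segs_struct l, if_pos hm, segs_struct t']
      simp
    have hget : PySem.List.pyGet? (String.ofList (l.takeWhile (fun c => c != ' '))
            :: String.ofList (t'.takeWhile (fun c => c != ' '))
            :: ((if ' ' ∈ t' then pvSegs ((t'.dropWhile (fun c => c != ' ')).tail) else []).map String.ofList)) 1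
        = some (String.ofList (t'.takeWhile (fun c => c != ' '))) := by
      simp [PySem.List.pyGet?, PySem.List.pyIdx?]
    rw [if_pos rfl]
    simp only [hsplit, hget, Option.getD_some]
    by_cases hm2 : ' ' ∈ t'
    · have hf2 : PySem.Chars.find t' [' '] = ((t'.takeWhile (fun c => c != ' ')).length : Int) := by
        rw [find_space]; simp [hm2]
      rw [hf2, if_neg (by omega : ¬(((t'.takeWhile (fun c => c != ' ')).length : Int) = -1))]
      apply String.toList_inj.mp
      simp only [PySem.Str.toList_slice, PySem.Chars.slice_eq_listSlice, ← hl, hsl,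
        String.toList_ofList]
      rw [PySem.List.slice_to t' (by omega : (0 : Int) ≤ ((t'.takeWhile (fun c => c != ' ')).length : Int))]
      rw [Int.toNat_natCast]
      exact (List.prefix_iff_eq_take.mp (List.takeWhile_prefix _)).symm
    · have hf2 : PySem.Chars.find t' [' '] = -1 := by
        rw [find_space]; simp [hm2]
      rw [hf2, if_pos rfl]
      apply String.toList_inj.mp
      simp only [PySem.Str.toList_slice, PySem.Chars.slice_eq_listSlice, ← hl, hsl,
        String.toList_ofList]
      exact (takeWhile_of_not_mem t' hm2).symm
  · set l := word.toList with hl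
    have hf : PySem.Chars.find l [' '] = -1 := by rw [find_space]; simp [hm]
    have hIs : PySem.Chars.isIn [' '] l = false := by simp [PySem.Chars.isIn, hf]
    have hsl : PySem.List.slice l (some (-1 + 1)) = l := by
      rw [show (-1 + 1 : Int) = 0 from rfl, PySem.List.slice_from l (le_refl 0)]
      simp
    rw [hf, hsl, hf, hIs]
    simp only [Bool.false_eq_true, if_false, if_true]
    apply String.toList_inj.mp
    simp only [PySem.Str.toList_slice, PySem.Chars.slice_eq_listSlice, ← hl]
    exact hsl
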